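-- pv_equiv track=rewrite | github.com/maxence-glt/UC-Berkeley-CS61a | Lab 5.py | add_chars
-- ===== SOURCE A (Python) =====
-- def add_chars(w1, w2):
--     if w1 == "":
--         return w2
--     if w2 == "":
--         return ""
--     else:
--         for x in w1:
--             for y in w2:
--                 if x != y:
--                     return y + add_chars(w1, w2[1:])
--                 else:
--                     return add_chars(w1[1:], w2[1:])
-- ===== SOURCE B (Python) =====
-- def add_chars(w1, w2):
--     i = 0
--     out = []
--     for ch in w2:
--         if i < len(w1):
--             if ch == w1[i]:
--                 i += 1
--             else:
--                 out.append(ch)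
--         else:
--             out.append(ch)
--     return "".join(out)
-- ===== Notes on version B (the rewrite author's own statement) =====
-- stated objective: faster
-- what changed: Replaced A's recursive O(n^2) string-slicing/concatenation with a single two-pointer pass over w2 keeping an index into w1 and an accumulator list joined once at the end.
import Mathlib
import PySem

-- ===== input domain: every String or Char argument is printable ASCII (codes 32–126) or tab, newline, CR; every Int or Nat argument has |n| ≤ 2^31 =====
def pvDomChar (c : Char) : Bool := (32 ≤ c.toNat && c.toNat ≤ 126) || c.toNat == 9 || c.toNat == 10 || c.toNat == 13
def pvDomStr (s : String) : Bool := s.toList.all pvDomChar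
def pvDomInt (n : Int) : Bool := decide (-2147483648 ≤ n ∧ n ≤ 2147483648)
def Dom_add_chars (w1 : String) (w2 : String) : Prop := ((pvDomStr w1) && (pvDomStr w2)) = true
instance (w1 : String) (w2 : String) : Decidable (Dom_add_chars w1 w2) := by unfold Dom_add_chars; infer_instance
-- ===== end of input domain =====

-- B replaces A's O(n^2) slicing recursion by a single two-pointer pass over w2 with an
-- accumulator list joined at the end (objective: faster, asymptotic).

-- ===== PORT A =====
-- A's nested 'for' loops return on their very first iteration (both branches return),
-- so with w1, w2 nonempty they are exactly: x := w1[0], y := w2[0], then the branch.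
-- Strings are ported through List Char per the PySem convention; 'y + rec' is cons,
-- 'w[1:]' is the tail of a nonempty list.
def addCharsAList : List Char → List Char → List Char
  | [], ys => ys                            -- if w1 == "": return w2
  | _ :: _, [] => []                        -- if w2 == "": return ""
  | x :: xs, y :: ys =>
      if x ≠ y then y :: addCharsAList (x :: xs) ys   -- return y + add_chars(w1, w2[1:])
      else addCharsAList xs ys                         -- return add_chars(w1[1:], w2[1:])

def add_chars (w1 : String) (w2 : String) : String :=
  String.mk (addCharsAList w1.toList w2.toList)

-- ===== PORT B =====
-- Source B: i = 0; out = []; for ch in w2: …; return "".join(out)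
def addCharsBStep (w1l : List Char) (acc : Nat × List Char) (ch : Char) : Nat × List Char :=
  if h : acc.1 < w1l.length then
    if ch = w1l[acc.1] then (acc.1 + 1, acc.2)
    else (acc.1, acc.2 ++ [ch])
  else (acc.1, acc.2 ++ [ch])

def add_chars_alt (w1 : String) (w2 : String) : String :=
  String.mk (w2.toList.foldl (addCharsBStep w1.toList) (0, [])).2

-- ===== PRECONDITION & SPEC =====
def Spec_add_chars (w1 : String) (w2 : String) (out : String) : Prop := out = add_chars_alt w1 w2
instance (w1 : String) (w2 : String) (out : String) : Decidable (Spec_add_chars w1 w2 out) := by unfold Spec_add_chars; infer_instance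

-- ===== CLAIM (what is proved, stated in full; the proofs are below) =====
def Claim_equal_add_chars : Prop := ∀ (w1 : String) (w2 : String), Dom_add_chars w1 w2 → Spec_add_chars w1 w2 (add_chars w1 w2)

-- ===== LEMMAS AND PROOFS =====
-- Loop invariant: the fold started at index i with accumulator 'out' ends with
-- out ++ (A's recursion applied to the unconsumed part of w1).
theorem addCharsB_invariant (w1l : List Char) :
    ∀ (ys : List Char) (i : Nat) (out : List Char),
      (ys.foldl (addCharsBStep w1l) (i, out)).2 = out ++ addCharsAList (w1l.drop i) ys := by
  intro ys
  induction ys with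
  | nil =>
      intro i out
      simp only [List.foldl_nil]
      cases h : w1l.drop i with
      | nil => simp [addCharsAList]
      | cons a l => simp [addCharsAList]
  | cons y ys ih =>
      intro i out
      simp only [List.foldl_cons]
      by_cases h : i < w1l.length
      · have hdrop : w1l.drop i = w1l[i] :: w1l.drop (i + 1) :=
          List.drop_eq_getElem_cons h
        by_cases heq : y = w1l[i]
        · simp only [addCharsBStep, dif_pos h, if_pos heq]
          rw [ih, hdrop, heq]
          simp [addCharsAList]
        · simp only [addCharsBStep, dif_pos h, if_neg heq]
          rw [ih, hdrop]
          have : w1l[i] ≠ y := fun hc => heq hc.symm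
          simp [addCharsAList, this]
      · have hdrop : w1l.drop i = [] := List.drop_eq_nil_of_le (Nat.le_of_not_lt h)
        simp only [addCharsBStep, dif_neg h]
        rw [ih, hdrop]
        simp [addCharsAList]

-- ===== VERDICT (by name: the statement is the Claim_ definition above) =====
theorem add_chars_spec : Claim_equal_add_chars := by
  intro w1 w2 _
  unfold Spec_add_chars add_chars add_chars_alt
  rw [addCharsB_invariant]
  simp
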